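-- pv_equiv track=rewrite | github.com/SuperInstance/spreadsheet-moment-proto | research/simulation_framework/multi_api_orchestrator.py | _extract_hypotheses
-- ===== SOURCE A (Python) =====
-- from typing import Dict, List, Optional, Any, Tuple
--
-- def _extract_hypotheses(text: str) -> List[str]:
--     """Extract hypotheses from generated text"""
--     lines = text.split('\n')
--     hypotheses = []
--     current_hypothesis = []
--
--     for line in lines:
--         if line.strip().startswith(('1.', '2.', '3.', '4.', '5.', '6.', '7.', '8.', '9.')):
--             if current_hypothesis:
--                 hypotheses.append('\n'.join(current_hypothesis))
--             current_hypothesis = [line]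
--         elif current_hypothesis:
--             current_hypothesis.append(line)
--
--     if current_hypothesis:
--         hypotheses.append('\n'.join(current_hypothesis))
--
--     return hypotheses
-- ===== SOURCE B (Python) =====
-- def _extract_hypotheses(text: str):
--     """Two-pass: find header-line boundaries, then slice-and-join segments."""
--     lines = text.split('\n')
--     headers = ('1.', '2.', '3.', '4.', '5.', '6.', '7.', '8.', '9.')
--     bounds = [i for i, line in enumerate(lines) if line.strip().startswith(headers)]
--     ends = bounds[1:] + [len(lines)]
--     return ['\n'.join(lines[s:e]) for s, e in zip(bounds, ends)]
-- ===== Notes on version B (the rewrite author's own statement) =====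
-- stated objective: alternative
-- what changed: Replaced A's single-pass accumulator that grows the current group line by line with a two-pass decomposition: first collect the indices of header lines ('1.'..'9.'), then slice the line list between consecutive boundaries and join each slice.
import Mathlib
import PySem

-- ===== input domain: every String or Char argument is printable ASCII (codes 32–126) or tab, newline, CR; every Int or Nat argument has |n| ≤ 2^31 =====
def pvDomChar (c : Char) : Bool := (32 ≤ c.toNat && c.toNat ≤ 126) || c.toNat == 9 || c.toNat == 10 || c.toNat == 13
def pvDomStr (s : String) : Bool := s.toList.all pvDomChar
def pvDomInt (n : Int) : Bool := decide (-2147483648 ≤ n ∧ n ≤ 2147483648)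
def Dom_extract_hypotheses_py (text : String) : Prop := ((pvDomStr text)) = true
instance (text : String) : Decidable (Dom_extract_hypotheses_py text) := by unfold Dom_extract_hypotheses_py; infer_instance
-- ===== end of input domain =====

-- B replaces A's single-pass accumulator grouping by a two-pass boundary-index-then-slice
-- decomposition (objective: alternative; same cost).

-- shared header test: line.strip().startswith(('1.', …, '9.')) — identical in both Pythons
def pvHeader (line : String) : Bool :=
  let s := PySem.Str.strip line
  PySem.Str.startswith s "1." || PySem.Str.startswith s "2." || PySem.Str.startswith s "3." ||
  PySem.Str.startswith s "4." || PySem.Str.startswith s "5." || PySem.Str.startswith s "6." ||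
  PySem.Str.startswith s "7." || PySem.Str.startswith s "8." || PySem.Str.startswith s "9."

-- ===== PORT A =====
def extract_hypotheses_py (text : String) : List String :=
  let lines := (PySem.Str.split? text "\n").getD []
  let st := lines.foldl (fun (acc : List String × List String) line =>
    if pvHeader line then
      ((if acc.2 ≠ [] then acc.1 ++ [PySem.Str.join "\n" acc.2] else acc.1), [line])
    else if acc.2 ≠ [] then (acc.1, acc.2 ++ [line])
    else acc) ([], [])
  if st.2 ≠ [] then st.1 ++ [PySem.Str.join "\n" st.2] else st.1

-- ===== PORT B =====
def extract_hypotheses_py_alt (text : String) : List String :=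
  let lines := (PySem.Str.split? text "\n").getD []
  let bounds := ((PySem.List.enumerate lines 0).filter (fun q => pvHeader q.2)).map (·.1)
  let ends := bounds.drop 1 ++ [(lines.length : Int)]
  (bounds.zip ends).map (fun q => PySem.Str.join "\n" (PySem.List.slice lines (some q.1) (some q.2)))

-- ===== PRECONDITION & SPEC =====
def Spec_extract_hypotheses_py (text : String) (out : List String) : Prop := out = extract_hypotheses_py_alt text
instance (text : String) (out : List String) : Decidable (Spec_extract_hypotheses_py text out) := by unfold Spec_extract_hypotheses_py; infer_instance

-- ===== CLAIM (what is proved, stated in full; the proofs are below) =====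
def Claim_equal_extract_hypotheses_py : Prop := ∀ (text : String), Dom_extract_hypotheses_py text → Spec_extract_hypotheses_py text (extract_hypotheses_py text)

-- ===== LEMMAS AND PROOFS =====

-- nat-level boundary indices of the header lines
def pvNatBounds (lines : List String) : List Nat :=
  match lines with
  | [] => []
  | l :: ls => if pvHeader l then 0 :: (pvNatBounds ls).map (· + 1) else (pvNatBounds ls).map (· + 1)

-- nat-level core of B
def pvBN (lines : List String) : List String :=
  let nb := pvNatBounds lines
  (nb.zip (nb.drop 1 ++ [lines.length])).map
    (fun q => PySem.Str.join "\n" ((lines.drop q.1).take (q.2 - q.1)))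

-- recursive characterisation of A's fold
def pvGather (cur : List String) (ls : List String) : List String :=
  match ls with
  | [] => [PySem.Str.join "\n" cur]
  | l :: ls => if pvHeader l then PySem.Str.join "\n" cur :: pvGather [l] ls
               else pvGather (cur ++ [l]) ls

def pvStart (ls : List String) : List String :=
  match ls with
  | [] => []
  | l :: ls => if pvHeader l then pvGather [l] ls else pvStart ls

theorem pv_bounds_gen (lines : List String) (s : Int) :
    ((PySem.List.enumerate lines s).filter (fun q => pvHeader q.2)).map (·.1)
      = (pvNatBounds lines).map (fun (k : Nat) => (k : Int) + s) := by
  induction lines generalizing s with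
  | nil => simp [PySem.List.enumerate_nil, pvNatBounds]
  | cons l ls ih =>
    rw [PySem.List.enumerate_cons]
    by_cases hp : pvHeader l
    · simp [pvNatBounds, hp, ih (s + 1), List.map_map, Function.comp_def]
      exact fun a _ => by ring
    · simp [pvNatBounds, hp, ih (s + 1), List.map_map, Function.comp_def]
      exact fun a _ => by ring

theorem pv_bounds_eq (lines : List String) :
    ((PySem.List.enumerate lines 0).filter (fun q => pvHeader q.2)).map (·.1)
      = (pvNatBounds lines).map (fun (k : Nat) => (k : Int)) := by
  simpa using pv_bounds_gen lines 0

theorem pv_alt_def (text : String) :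
    extract_hypotheses_py_alt text =
      (List.zip
        (List.map (fun x => x.1) (List.filter (fun q => pvHeader q.2)
          (PySem.List.enumerate ((PySem.Str.split? text "\n").getD []) 0)))
        (List.drop 1 (List.map (fun x => x.1) (List.filter (fun q => pvHeader q.2)
          (PySem.List.enumerate ((PySem.Str.split? text "\n").getD []) 0)))
         ++ [(((PySem.Str.split? text "\n").getD []).length : Int)])).map
        (fun q => PySem.Str.join "\n"
          (PySem.List.slice ((PySem.Str.split? text "\n").getD []) (some q.1) (some q.2))) := rfl

theorem pv_alt_eq_BN (text : String) :
    extract_hypotheses_py_alt text = pvBN ((PySem.Str.split? text "\n").getD []) := by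
  rw [pv_alt_def]
  set lines := (PySem.Str.split? text "\n").getD [] with hl
  rw [pv_bounds_eq]
  set nb := pvNatBounds lines with hnb
  have hends : ((nb.map (fun (k : Nat) => (k : Int))).drop 1 ++ [(lines.length : Int)])
      = (nb.drop 1 ++ [lines.length]).map (fun (k : Nat) => (k : Int)) := by
    simp
  rw [hends, List.zip_map, List.map_map]
  show _ = pvBN lines
  unfold pvBN
  rw [← hnb]
  refine List.map_congr_left ?_
  rintro ⟨sb, eb⟩ _
  simp [PySem.List.slice_natCast]

theorem pv_shift_seg (l : String) (ls : List String) (nb : List Nat) :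
    ((nb.map (· + 1)).zip ((nb.map (· + 1)).drop 1 ++ [ls.length + 1])).map
      (fun q => PySem.Str.join "\n" (((l :: ls).drop q.1).take (q.2 - q.1)))
    = (nb.zip (nb.drop 1 ++ [ls.length])).map
      (fun q => PySem.Str.join "\n" ((ls.drop q.1).take (q.2 - q.1))) := by
  have h : (nb.map (· + 1)).drop 1 ++ [ls.length + 1] = (nb.drop 1 ++ [ls.length]).map (· + 1) := by
    simp
  rw [h, List.zip_map, List.map_map]
  refine List.map_congr_left ?_
  rintro ⟨s, e⟩ _
  simp

theorem pv_gather_all (ls : List String) (cur : List String) (h : ∀ x ∈ ls, ¬ pvHeader x = true) :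
    pvGather cur ls = [PySem.Str.join "\n" (cur ++ ls)] := by
  induction ls generalizing cur with
  | nil => simp [pvGather]
  | cons l ls ih =>
    have hl : ¬ pvHeader l = true := h l (by simp)
    simp only [pvGather, if_neg hl]
    rw [ih (cur ++ [l]) (fun x hx => h x (by simp [hx]))]
    simp

theorem pv_natBounds_nil_all (ls : List String) (h : pvNatBounds ls = []) :
    ∀ x ∈ ls, ¬ pvHeader x = true := by
  induction ls with
  | nil => simp
  | cons l ls ih =>
    by_cases hp : pvHeader l
    · simp [pvNatBounds, hp] at h
    · simp only [pvNatBounds, if_neg hp, List.map_eq_nil_iff] at h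
      intro x hx
      rcases List.mem_cons.mp hx with rfl | hx
      · exact hp
      · exact ih h x hx

theorem pv_natBounds_head (ls : List String) (b : Nat) (rest : List Nat)
    (h : pvNatBounds ls = b :: rest) :
    b = (ls.takeWhile (fun x => !pvHeader x)).length := by
  induction ls generalizing b rest with
  | nil => simp [pvNatBounds] at h
  | cons l ls ih =>
    by_cases hp : pvHeader l
    · simp only [pvNatBounds, if_pos hp, List.cons.injEq] at h
      simp [hp, ← h.1]
    · simp only [pvNatBounds, if_neg hp] at h
      rcases hnb : pvNatBounds ls with _ | ⟨b', rest'⟩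
      · simp [hnb] at h
      · rw [hnb] at h
        simp only [List.map_cons, List.cons.injEq] at h
        simp [hp, ih b' rest' hnb, ← h.1]

theorem pv_start_dropWhile (ls : List String) :
    pvStart ls = pvStart (ls.dropWhile (fun x => !pvHeader x)) := by
  induction ls with
  | nil => simp
  | cons l ls ih =>
    by_cases hp : pvHeader l
    · simp [pvStart, hp]
    · simp [pvStart, hp, ih]

theorem pv_gather_eq (ls : List String) (cur : List String) :
    pvGather cur ls = PySem.Str.join "\n" (cur ++ ls.takeWhile (fun x => !pvHeader x))
      :: pvStart (ls.dropWhile (fun x => !pvHeader x)) := by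
  induction ls generalizing cur with
  | nil => simp [pvGather, pvStart]
  | cons l ls ih =>
    by_cases hp : pvHeader l
    · simp [pvGather, hp, pvStart]
    · simp [pvGather, hp, ih (cur ++ [l])]

theorem pv_take_takeWhile {α : Type} (p : α → Bool) (ls : List α) :
    ls.take (ls.takeWhile p).length = ls.takeWhile p := by
  induction ls with
  | nil => simp
  | cons l ls ih =>
    by_cases hp : p l
    · simp [hp, ih]
    · simp [hp]

theorem pv_BN_eq_start (ls : List String) : pvBN ls = pvStart ls := by
  induction ls with
  | nil => simp [pvBN, pvNatBounds, pvStart]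
  | cons l ls ih =>
    by_cases hp : pvHeader l
    · rcases hnb : pvNatBounds ls with _ | ⟨b, rest⟩
      · have hall := pv_natBounds_nil_all ls hnb
        simp only [pvBN, pvNatBounds, if_pos hp, hnb, List.map_nil, List.drop,
          List.nil_append, List.zip_cons_cons, List.zip_nil_right, List.map_cons, List.map_nil]
        simp only [pvStart, if_pos hp, pv_gather_all ls [l] hall]
        simp [List.take_of_length_le]
      · simp only [pvBN, pvNatBounds, if_pos hp, hnb, List.map_cons, List.length_cons,
          List.drop_succ_cons, List.drop_zero]
        have htail := pv_shift_seg l ls (pvNatBounds ls)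
        rw [hnb] at htail
        simp only [List.map_cons, List.drop_succ_cons, List.drop_zero] at htail
        simp only [List.cons_append, List.zip_cons_cons, List.map_cons]
        rw [htail]
        have hBN : (pvNatBounds ls).zip ((pvNatBounds ls).drop 1 ++ [ls.length]) =
            (b :: rest).zip (rest ++ [ls.length]) := by rw [hnb]; rfl
        have ihBN : ((b :: rest).zip (rest ++ [ls.length])).map
            (fun q => PySem.Str.join "\n" ((ls.drop q.1).take (q.2 - q.1))) = pvStart ls := by
          rw [← hBN]; rw [← ih]; rfl
        rw [ihBN]
        simp only [pvStart, if_pos hp, pv_gather_eq]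
        rw [pv_start_dropWhile ls]
        have hb := pv_natBounds_head ls b rest hnb
        simp only [List.drop_zero, Nat.sub_zero, List.take_succ_cons, hb, pv_take_takeWhile]
        simp
    · simp only [pvBN, pvNatBounds, if_neg hp, List.length_cons]
      rw [pv_shift_seg l ls (pvNatBounds ls)]
      simp only [pvStart, if_neg hp]
      rw [← ih]; rfl

def pvStepA (acc : List String × List String) (line : String) : List String × List String :=
  if pvHeader line then
    ((if acc.2 ≠ [] then acc.1 ++ [PySem.Str.join "\n" acc.2] else acc.1), [line])
  else if acc.2 ≠ [] then (acc.1, acc.2 ++ [line])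
  else acc

def pvFinA (ls : List String) (hyps cur : List String) : List String :=
  let st := ls.foldl pvStepA (hyps, cur)
  if st.2 ≠ [] then st.1 ++ [PySem.Str.join "\n" st.2] else st.1

theorem pv_step_def : pvStepA = (fun (acc : List String × List String) line =>
    if pvHeader line then
      ((if acc.2 ≠ [] then acc.1 ++ [PySem.Str.join "\n" acc.2] else acc.1), [line])
    else if acc.2 ≠ [] then (acc.1, acc.2 ++ [line])
    else acc) := rfl

theorem pv_a_def (text : String) :
    extract_hypotheses_py text = pvFinA ((PySem.Str.split? text "\n").getD []) [] [] := by
  unfold extract_hypotheses_py pvFinA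
  rw [pv_step_def]

theorem pv_finA_pair (ls : List String) (x : List String × List String) :
    pvFinA ls x.1 x.2 = (let st := ls.foldl pvStepA x
      if st.2 ≠ [] then st.1 ++ [PySem.Str.join "\n" st.2] else st.1) := by
  cases x
  rfl

theorem pv_finA_cons (l : String) (ls : List String) (hyps cur : List String) :
    pvFinA (l :: ls) hyps cur
      = pvFinA ls (pvStepA (hyps, cur) l).1 (pvStepA (hyps, cur) l).2 := by
  rw [pv_finA_pair]
  show (let st := List.foldl pvStepA (hyps, cur) (l :: ls)
    if st.2 ≠ [] then st.1 ++ [PySem.Str.join "\n" st.2] else st.1) = _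
  rw [List.foldl_cons]

theorem pv_foldA_ne (ls : List String) (hyps cur : List String) (h : cur ≠ []) :
    pvFinA ls hyps cur = hyps ++ pvGather cur ls := by
  induction ls generalizing hyps cur with
  | nil => simp [pvFinA, h, pvGather]
  | cons l ls ih =>
    rw [pv_finA_cons]
    by_cases hp : pvHeader l
    · have hstep : pvStepA (hyps, cur) l = (hyps ++ [PySem.Str.join "\n" cur], [l]) := by
        simp [pvStepA, hp, h]
      rw [hstep]
      rw [ih (hyps ++ [PySem.Str.join "\n" cur]) [l] (by simp)]
      simp [pvGather, hp]
    · have hstep : pvStepA (hyps, cur) l = (hyps, cur ++ [l]) := by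
        simp [pvStepA, hp, h]
      rw [hstep]
      rw [ih hyps (cur ++ [l]) (by simp)]
      simp [pvGather, hp]

theorem pv_foldA_nil (ls : List String) (hyps : List String) :
    pvFinA ls hyps [] = hyps ++ pvStart ls := by
  induction ls generalizing hyps with
  | nil => simp [pvFinA, pvStart]
  | cons l ls ih =>
    rw [pv_finA_cons]
    by_cases hp : pvHeader l
    · have hstep : pvStepA (hyps, []) l = (hyps, [l]) := by simp [pvStepA, hp]
      rw [hstep]
      rw [pv_foldA_ne ls hyps [l] (by simp)]
      simp [pvStart, hp]
    · have hstep : pvStepA (hyps, []) l = (hyps, []) := by simp [pvStepA, hp]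
      rw [hstep]
      rw [ih hyps]
      simp [pvStart, hp]

-- ===== VERDICT (by name: the statement is the Claim_ definition above) =====
theorem extract_hypotheses_py_spec : Claim_equal_extract_hypotheses_py := by
  intro text _
  unfold Spec_extract_hypotheses_py
  rw [pv_alt_eq_BN, pv_BN_eq_start, pv_a_def, pv_foldA_nil]
  simp
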